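-- pv_equiv track=rewrite | github.com/pypi-data/pypi-mirror-142 | packages/instarepo/instarepo-0.12.0-py3-none-any.whl/instarepo/fixers/readme.py | locate_badges
-- ===== SOURCE A (Python) =====
-- from typing import List, Tuple
--
-- def locate_badges(readme_contents: str) -> Tuple[str, List[str], str]:
--     before_badges = []
--     badges = []
--     after_badges = []
--     state = 0
--     for line in readme_contents.splitlines():
--         if state == 0:
--             if _is_badge_line(line):
--                 state = 1
--                 badges.append(line)
--             else:
--                 before_badges.append(line)
--         elif state == 1:
--             if _is_badge_line(line):
--                 badges.append(line)
--             else: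
--                 state = 2
--                 after_badges.append(line)
--         else:
--             after_badges.append(line)
--     if state == 0:
--         # no badges were found, try to split based on headline
--         return (_join_lines(before_badges[0:1]), [], _join_lines(before_badges[1:]))
--     return (_join_lines(before_badges), badges, _join_lines(after_badges))
--
-- def _is_badge_line(line: str) -> bool:
--     return line.startswith("[![")
--
-- def _join_lines(lines: List[str]) -> str:
--     return "\n".join(_strip_empty_lines(lines)) + "\n"
--
-- def _strip_empty_lines(lines: List[str]) -> List[str]:
--     return _strip_trailing_empty_lines(_strip_leading_empty_lines(lines))
--
-- def _strip_leading_empty_lines(lines: List[str]) -> List[str]: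
--     i = 0
--     while i < len(lines) and len(lines[i]) == 0:
--         i += 1
--     return lines[i:]
--
-- def _strip_trailing_empty_lines(lines: List[str]) -> List[str]:
--     i = len(lines) - 1
--     while i >= 0 and len(lines[i]) == 0:
--         i -= 1
--     return lines[0 : i + 1]
-- ===== SOURCE B (Python) =====
-- from typing import List, Tuple
--
-- def locate_badges(readme_contents: str) -> Tuple[str, List[str], str]:
--     lines = readme_contents.splitlines()
--     before = _take_while(lambda line: not _is_badge_line(line), lines)
--     rest = lines[len(before):]
--     if not rest:
--         # no badges were found, split based on headline
--         return (_join_lines(lines[0:1]), [], _join_lines(lines[1:]))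
--     badges = _take_while(_is_badge_line, rest)
--     return (_join_lines(before), badges, _join_lines(rest[len(badges):]))
--
-- def _take_while(pred, lines: List[str]) -> List[str]:
--     out = []
--     for line in lines:
--         if not pred(line):
--             break
--         out.append(line)
--     return out
--
-- # helpers below are reused unchanged from the original module
--
-- def _is_badge_line(line: str) -> bool:
--     return line.startswith("[![")
--
-- def _join_lines(lines: List[str]) -> str:
--     return "\n".join(_strip_empty_lines(lines)) + "\n"
--
-- def _strip_empty_lines(lines: List[str]) -> List[str]:
--     return _strip_trailing_empty_lines(_strip_leading_empty_lines(lines))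
--
-- def _strip_leading_empty_lines(lines: List[str]) -> List[str]:
--     i = 0
--     while i < len(lines) and len(lines[i]) == 0:
--         i += 1
--     return lines[i:]
--
-- def _strip_trailing_empty_lines(lines: List[str]) -> List[str]:
--     i = len(lines) - 1
--     while i >= 0 and len(lines[i]) == 0:
--         i -= 1
--     return lines[0 : i + 1]
-- ===== Notes on version B (the rewrite author's own statement) =====
-- stated objective: simpler
-- what changed: Replaced the three-accumulator 0/1/2 state machine over the lines with a boundary-first decomposition: takeWhile the non-badge prefix, then takeWhile the badge run, and slice the line list at those two boundaries.
import Mathlib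
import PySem

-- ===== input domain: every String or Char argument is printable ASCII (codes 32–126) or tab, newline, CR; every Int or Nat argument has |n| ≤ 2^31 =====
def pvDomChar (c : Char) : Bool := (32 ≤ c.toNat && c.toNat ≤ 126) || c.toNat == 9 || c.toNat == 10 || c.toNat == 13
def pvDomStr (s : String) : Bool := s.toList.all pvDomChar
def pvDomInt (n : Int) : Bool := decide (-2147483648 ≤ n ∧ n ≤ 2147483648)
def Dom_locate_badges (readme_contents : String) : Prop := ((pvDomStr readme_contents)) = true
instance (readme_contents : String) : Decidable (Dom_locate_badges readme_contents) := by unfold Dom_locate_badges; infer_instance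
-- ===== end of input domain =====

-- B replaces A's 0/1/2 state machine by a boundary-first decomposition (non-badge prefix,
-- then the badge run, then the rest); objective: simpler. The stripping helpers are shared
-- by both Python files and are defined once below.

-- ===== PORT A =====
-- shared helpers (identical functions in both Python modules)
def pvIsBadgeLine (line : String) : Bool := PySem.Str.startswith line "[!["

def pvIsEmptyLine (line : String) : Bool := PySem.Str.len line == 0

-- _strip_leading_empty_lines: the index-advancing while loop then lines[i:] = drop the empty prefix
def pvStripLeadingEmpty (ls : List String) : List String := ls.dropWhile pvIsEmptyLine

-- _strip_trailing_empty_lines: the index-retreating while loop then lines[0:i+1]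
-- = drop the empty suffix, ported as dropWhile on the reversed list (exact: same result list)
def pvStripTrailingEmpty (ls : List String) : List String :=
  ((ls.reverse).dropWhile pvIsEmptyLine).reverse

-- _join_lines: "\n".join(...) + "\n"  (String ++ is Python's str +, exact)
def pvJoinLines (ls : List String) : String :=
  PySem.Str.join "\n" (pvStripTrailingEmpty (pvStripLeadingEmpty ls)) ++ "\n"

-- the body of A's for loop: state is (before_badges, badges, after_badges, state)
def pvStepA (st : List String × List String × List String × Nat) (line : String) :
    List String × List String × List String × Nat :=
  match st with
  | (bs, gs, fs, s) =>
    if s = 0 then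
      if pvIsBadgeLine line then (bs, gs ++ [line], fs, 1) else (bs ++ [line], gs, fs, 0)
    else if s = 1 then
      if pvIsBadgeLine line then (bs, gs ++ [line], fs, 1) else (bs, gs, fs ++ [line], 2)
    else (bs, gs, fs ++ [line], 2)

def locate_badges (readme_contents : String) : String × List String × String :=
  let r := (PySem.Str.splitlines readme_contents).foldl pvStepA ([], [], [], 0)
  if r.2.2.2 = 0 then
    -- no badges were found, try to split based on headline; [0:1] / [1:] = take 1 / drop 1
    (pvJoinLines (r.1.take 1), [], pvJoinLines (r.1.drop 1))
  else (pvJoinLines r.1, r.2.1, pvJoinLines r.2.2.1)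

-- ===== PORT B =====
def locate_badges_alt (readme_contents : String) : String × List String × String :=
  let lines := PySem.Str.splitlines readme_contents
  -- _take_while is Source B's hand-written takeWhile loop
  let before := lines.takeWhile (fun line => !pvIsBadgeLine line)
  let rest := lines.drop before.length
  if rest.isEmpty then (pvJoinLines (lines.take 1), [], pvJoinLines (lines.drop 1))
  else
    let badges := rest.takeWhile pvIsBadgeLine
    (pvJoinLines before, badges, pvJoinLines (rest.drop badges.length))

-- ===== PRECONDITION & SPEC =====
def Spec_locate_badges (readme_contents : String) (out : String × List String × String) : Prop := out = locate_badges_alt readme_contents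
instance (readme_contents : String) (out : String × List String × String) : Decidable (Spec_locate_badges readme_contents out) := by unfold Spec_locate_badges; infer_instance

-- ===== CLAIM (what is proved, stated in full; the proofs are below) =====
def Claim_equal_locate_badges : Prop := ∀ (readme_contents : String), Dom_locate_badges readme_contents → Spec_locate_badges readme_contents (locate_badges readme_contents)

-- ===== LEMMAS AND PROOFS =====

-- drop at the takeWhile boundary is dropWhile
theorem pv_drop_takeWhile (p : String → Bool) (ls : List String) :
    ls.drop (ls.takeWhile p).length = ls.dropWhile p := by
  induction ls with
  | nil => rfl
  | cons a t ih => by_cases h : p a <;> simp [List.takeWhile, List.dropWhile, h, ih]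

-- in state 2 the loop only appends to after_badges
theorem pv_foldl_state2 (ls bs gs fs : List String) :
    ls.foldl pvStepA (bs, gs, fs, 2) = (bs, gs, fs ++ ls, 2) := by
  induction ls generalizing fs with
  | nil => simp
  | cons a t ih => simp [pvStepA, ih]

-- in state 1 the loop collects the badge run then dumps the rest into after_badges
theorem pv_foldl_state1 (ls bs gs fs : List String) :
    ls.foldl pvStepA (bs, gs, fs, 1) =
      (bs, gs ++ ls.takeWhile pvIsBadgeLine, fs ++ ls.dropWhile pvIsBadgeLine,
        if ls.dropWhile pvIsBadgeLine = [] then 1 else 2) := by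
  induction ls generalizing gs with
  | nil => simp
  | cons a t ih =>
    by_cases h : pvIsBadgeLine a
    · simp [pvStepA, h, List.takeWhile, List.dropWhile, ih]
    · simp [pvStepA, h, List.takeWhile, List.dropWhile, pv_foldl_state2]

-- from state 0 the whole loop splits the lines at the two boundaries
theorem pv_foldl_state0 (ls bs : List String) :
    ls.foldl pvStepA (bs, [], [], 0) =
      if ls.dropWhile (fun l => !pvIsBadgeLine l) = [] then (bs ++ ls, [], [], 0)
      else
        (bs ++ ls.takeWhile (fun l => !pvIsBadgeLine l),
         (ls.dropWhile (fun l => !pvIsBadgeLine l)).takeWhile pvIsBadgeLine,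
         (ls.dropWhile (fun l => !pvIsBadgeLine l)).dropWhile pvIsBadgeLine,
         if (ls.dropWhile (fun l => !pvIsBadgeLine l)).dropWhile pvIsBadgeLine = [] then 1 else 2) := by
  induction ls generalizing bs with
  | nil => simp
  | cons a t ih =>
    by_cases h : pvIsBadgeLine a
    · simp [pvStepA, h, List.takeWhile, List.dropWhile, pv_foldl_state1]
    · rw [List.foldl_cons]
      have hstep : pvStepA (bs, [], [], 0) a = (bs ++ [a], [], [], 0) := by simp [pvStepA, h]
      rw [hstep, ih (bs ++ [a])]
      simp only [List.takeWhile_cons, List.dropWhile_cons, h, Bool.not_false, if_true]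
      split_ifs with h1 <;> simp

-- ===== VERDICT (by name: the statement is the Claim_ definition above) =====
theorem locate_badges_spec : Claim_equal_locate_badges := by
  intro rc _
  unfold Spec_locate_badges locate_badges locate_badges_alt
  rw [pv_foldl_state0]
  by_cases h : (PySem.Str.splitlines rc).dropWhile (fun l => !pvIsBadgeLine l) = []
  · simp [h, pv_drop_takeWhile]
  · rw [if_neg h]
    have h2 : ((PySem.Str.splitlines rc).dropWhile (fun l => !pvIsBadgeLine l)).isEmpty = false := by
      simpa [List.isEmpty_iff] using h
    simp [h2, pv_drop_takeWhile]
    intro hc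
    split_ifs at hc
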